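-- pv_equiv track=rewrite | github.com/pranavjindal29/Competitive-Coding-Archives-Leetcode | 1934-evaluate-the-bracket-pairs-of-a-string/evaluate-the-bracket-pairs-of-a-string.py | evaluate
-- ===== SOURCE A (Python) =====
-- from typing import List
--
-- def evaluate(s: str, knowledge: List[List[str]]) -> str:
--     knowledge = {a:b for (a,b) in knowledge}
--     words = []
--     word = ''
--     for c in s:
--         if c == '(':
--             words.append((word, 0))
--             word = ''
--         elif c == ')':
--             words.append((word, 1))
--             word = ''
--         else:
--             word += c
--     words.append((word, 0))
--     ret = ''
--     for word, in_knowledge in words: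
--         if in_knowledge:
--             ret += knowledge.get(word, '?')
--         else:
--             ret += word
--     return ret
-- ===== SOURCE B (Python) =====
-- from typing import List
--
-- def evaluate(s: str, knowledge: List[List[str]]) -> str:
--     kd = {a: b for a, b in knowledge}
--     out = []
--     for part in s.split('('):
--         segs = part.split(')')
--         for key in segs[:-1]:
--             out.append(kd.get(key, '?'))
--         out.append(segs[-1])
--     return ''.join(out)
-- ===== Notes on version B (the rewrite author's own statement) =====
-- stated objective: alternative
-- what changed: B replaces A's per-character scan that builds a (chunk, flag) token list and then maps over it by a split-based pipeline: split on '(', split each piece on ')', look up every segment before the last ')' in the dict and keep the trailing segment literal, then join.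
import Mathlib
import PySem

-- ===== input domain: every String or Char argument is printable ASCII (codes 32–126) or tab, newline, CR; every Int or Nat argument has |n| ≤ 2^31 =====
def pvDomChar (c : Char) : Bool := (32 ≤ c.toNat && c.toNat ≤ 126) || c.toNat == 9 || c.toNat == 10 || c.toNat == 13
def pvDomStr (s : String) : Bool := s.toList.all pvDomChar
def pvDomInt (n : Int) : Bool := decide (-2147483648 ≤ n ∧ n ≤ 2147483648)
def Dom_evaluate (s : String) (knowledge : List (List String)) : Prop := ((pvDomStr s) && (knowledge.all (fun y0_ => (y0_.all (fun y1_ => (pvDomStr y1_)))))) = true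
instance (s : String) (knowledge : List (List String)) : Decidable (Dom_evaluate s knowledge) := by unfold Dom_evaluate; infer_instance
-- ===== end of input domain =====

-- B answers by string splitting (split on '(', then on ')', lookup + join) instead of A's char scan building a token list: an alternative algorithm, same cost.


-- ===== PORT A =====
-- shared by both ports: the dict comprehension {a:b for (a,b) in knowledge}
-- (entries not of length 2 raise ValueError in Python; Pre_ excludes them, the catch-all branch is unreached there)
def pvKnowDict (knowledge : List (List String)) : PySem.Dict String String :=
  knowledge.foldl (fun d kv =>
    match kv with
    | [a, b] => d.insert a b
    | _ => d) PySem.Dict.empty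

def evaluate (s : String) (knowledge : List (List String)) : String :=
  let kd := pvKnowDict knowledge
  let p := s.toList.foldl (fun (p : List (String × Nat) × String) c =>
    if c = '(' then (p.1 ++ [(p.2, 0)], "")
    else if c = ')' then (p.1 ++ [(p.2, 1)], "")
    else (p.1, p.2.push c)) ([], "")
  let words := p.1 ++ [(p.2, 0)]
  words.foldl (fun ret wk =>
    if wk.2 ≠ 0 then ret ++ kd.getD wk.1 "?" else ret ++ wk.1) ""

-- ===== PORT B =====
-- s.split('(') / part.split(')') are ported as PySem.Chars.splitOn on the code points (exact);
-- segs[:-1] is List.dropLast (PySem.List.slice_to_neg_one); segs[-1] is PySem.List.pyGetD segs (-1).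
def evaluate_alt (s : String) (knowledge : List (List String)) : String :=
  let kd := pvKnowDict knowledge
  let out := (PySem.Chars.splitOn s.toList ['(']).foldl (fun (out : List String) part =>
    let segs := PySem.Chars.splitOn part [')']
    (out ++ segs.dropLast.map (fun key => kd.getD (String.ofList key) "?"))
      ++ [String.ofList (PySem.List.pyGetD segs (-1) [])]) []
  PySem.Str.join "" out

-- ===== PRECONDITION & SPEC =====
-- Pre_ excludes knowledge entries whose length is not exactly 2: Python's (a,b) unpacking raises ValueError there.
def Pre_evaluate (s : String) (knowledge : List (List String)) : Prop :=
  knowledge.all (fun kv => kv.length == 2) = true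
instance (s : String) (knowledge : List (List String)) : Decidable (Pre_evaluate s knowledge) := by unfold Pre_evaluate; infer_instance
def pvWitness_evaluate : String × List (List String) := ("(a)b", [["a", "x"]])

def Spec_evaluate (s : String) (knowledge : List (List String)) (out : String) : Prop := out = evaluate_alt s knowledge
instance (s : String) (knowledge : List (List String)) (out : String) : Decidable (Spec_evaluate s knowledge out) := by unfold Spec_evaluate; infer_instance

-- ===== CLAIM (what is proved, stated in full; the proofs are below) =====
def Claim_equal_evaluate : Prop := ∀ (s : String) (knowledge : List (List String)), Dom_evaluate s knowledge → Pre_evaluate s knowledge → Spec_evaluate s knowledge (evaluate s knowledge)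

-- ===== LEMMAS AND PROOFS =====

-- spec of Python's str.split with a single-character separator
def pvSplitc (c : Char) : List Char → List (List Char)
  | [] => [[]]
  | x :: t => if x = c then [] :: pvSplitc c t else (pvSplitc c t).modifyHead (x :: ·)

lemma pvSplitc_ne_nil (c : Char) (l : List Char) : pvSplitc c l ≠ [] := by
  induction l with
  | nil => simp [pvSplitc]
  | cons x t ih =>
    simp only [pvSplitc]
    split_ifs
    · simp
    · cases h : pvSplitc c t with
      | nil => exact absurd h ih
      | cons a r => simp [List.modifyHead]

lemma pvSplitc_cons (c x : Char) (t : List Char) :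
    pvSplitc c (x :: t) = if x = c then [] :: pvSplitc c t else (pvSplitc c t).modifyHead (x :: ·) := rfl

lemma pvGo (c : Char) : ∀ (fuel : Nat) (l cur : List Char) (acc : List (List Char)),
    l.length ≤ fuel →
    PySem.Chars.splitOn.go [c] fuel l cur acc
      = acc.reverse ++ (pvSplitc c l).modifyHead (cur.reverse ++ ·) := by
  intro fuel
  induction fuel with
  | zero =>
    intro l cur acc hl
    have : l = [] := List.eq_nil_of_length_eq_zero (Nat.le_zero.mp hl)
    subst this
    rw [PySem.Chars.splitOn.go.eq_def]
    simp [pvSplitc]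
  | succ fuel ih =>
    intro l cur acc hl
    cases l with
    | nil =>
      rw [PySem.Chars.splitOn.go.eq_def]
      simp [pvSplitc]
    | cons x rest =>
      have hlen : rest.length ≤ fuel := by
        simp only [List.length_cons] at hl; omega
      have hstep : PySem.Chars.splitOn.go [c] (fuel + 1) (x :: rest) cur acc
          = if [c].isPrefixOf (x :: rest) = true
            then PySem.Chars.splitOn.go [c] fuel rest [] (cur.reverse :: acc)
            else PySem.Chars.splitOn.go [c] fuel rest (x :: cur) acc := rfl
      rw [hstep]
      by_cases hx : x = c
      · subst hx
        rw [if_pos (by simp)]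
        rw [ih rest [] (cur.reverse :: acc) hlen]
        rw [pvSplitc_cons, if_pos rfl]
        cases h : pvSplitc x rest with
        | nil => exact absurd h (pvSplitc_ne_nil x rest)
        | cons a r => simp [List.modifyHead]
      · rw [if_neg (by
          simp only [List.isPrefixOf_iff_prefix, List.cons_prefix_cons, List.nil_prefix, and_true]
          exact fun e => hx e.symm)]
        rw [ih rest (x :: cur) acc hlen]
        rw [pvSplitc_cons, if_neg hx]
        cases h : pvSplitc c rest with
        | nil => exact absurd h (pvSplitc_ne_nil c rest)
        | cons a r => simp [List.modifyHead]

lemma pvSplitOn_eq (c : Char) (l : List Char) :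
    PySem.Chars.splitOn l [c] = pvSplitc c l := by
  have h := pvGo c (l.length + 1) l [] [] (by omega)
  cases hS : pvSplitc c l with
  | nil => exact absurd hS (pvSplitc_ne_nil c l)
  | cons a r =>
    rw [hS] at h
    simpa [PySem.Chars.splitOn, List.modifyHead] using h

lemma pvSplitc_append (c : Char) (w p : List Char) (h : c ∉ w) :
    pvSplitc c (w ++ p) = (pvSplitc c p).modifyHead (w ++ ·) := by
  induction w with
  | nil =>
    cases hp : pvSplitc c p with
    | nil => exact absurd hp (pvSplitc_ne_nil c p)
    | cons a r => simp [hp, List.modifyHead]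
  | cons x w' ih =>
    have hx : x ≠ c := by intro e; exact h (e ▸ List.mem_cons_self)
    have h' : c ∉ w' := fun m => h (List.mem_cons_of_mem _ m)
    cases hp : pvSplitc c p with
    | nil => exact absurd hp (pvSplitc_ne_nil c p)
    | cons a r =>
      simp only [List.cons_append, pvSplitc, hx, if_false, ih h', hp, List.modifyHead]

-- concatenation of a list of strings (''.join with no separator)
def pvCat : List String → String
  | [] => ""
  | x :: t => x ++ pvCat t

lemma pvCat_append (xs ys : List String) : pvCat (xs ++ ys) = pvCat xs ++ pvCat ys := by
  induction xs with
  | nil => simp [pvCat]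
  | cons x t ih => simp [pvCat, ih, String.append_assoc]

-- what B contributes for one '('-delimited piece
def pvPart (kd : PySem.Dict String String) (part : List Char) : String :=
  pvCat ((pvSplitc ')' part).dropLast.map (fun k => kd.getD (String.ofList k) "?"))
    ++ String.ofList (PySem.List.pyGetD (pvSplitc ')' part) (-1) [])

-- the common recursive specification of the result (right-associated)
def pvR (kd : PySem.Dict String String) : List Char → List Char → String
  | [], w => String.ofList w
  | x :: t, w =>
    if x = '(' then String.ofList w ++ pvR kd t []
    else if x = ')' then kd.getD (String.ofList w) "?" ++ pvR kd t []
    else pvR kd t (w ++ [x])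

lemma pvLast_singleton {α : Type} (w : α) (d : α) :
    PySem.List.pyGetD [w] (-1) d = w := by
  simp [PySem.List.pyGetD_neg_one ([w]) d (by simp)]

lemma pvLast_cons {α : Type} (w q : α) (qs : List α) (d : α) :
    PySem.List.pyGetD (w :: q :: qs) (-1) d = PySem.List.pyGetD (q :: qs) (-1) d := by
  rw [PySem.List.pyGetD_neg_one (w :: q :: qs) d (by simp),
      PySem.List.pyGetD_neg_one (q :: qs) d (by simp)]
  exact List.getLast_cons (by simp)

-- B's split structure renders to pvR
lemma pvB_spec (kd : PySem.Dict String String) :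
    ∀ (cs : List Char) (w : List Char), '(' ∉ w → ')' ∉ w →
    pvR kd cs w = pvCat (((pvSplitc '(' cs).modifyHead (w ++ ·)).map (pvPart kd)) := by
  intro cs
  induction cs with
  | nil =>
    intro w _ h2
    have hw : pvSplitc ')' w = [w] := by
      have := pvSplitc_append ')' w [] h2
      simpa [pvSplitc, List.modifyHead] using this
    simp [pvR, pvSplitc, List.modifyHead, pvPart, hw, pvCat, pvLast_singleton]
  | cons x t ih =>
    intro w h1 h2
    by_cases hx1 : x = '('
    · subst hx1
      cases hS : pvSplitc '(' t with
      | nil => exact absurd hS (pvSplitc_ne_nil _ t)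
      | cons p ps =>
        have hw : pvSplitc ')' w = [w] := by
          have := pvSplitc_append ')' w [] h2
          simpa [pvSplitc, List.modifyHead] using this
        have hIH := ih [] (by simp) (by simp)
        rw [hS] at hIH
        simp only [List.modifyHead, List.nil_append] at hIH
        simp [pvR, pvSplitc, hS, List.modifyHead, pvCat, hIH, pvPart, hw,
          pvLast_singleton, String.append_assoc]
    · by_cases hx2 : x = ')'
      · subst hx2
        cases hS : pvSplitc '(' t with
        | nil => exact absurd hS (pvSplitc_ne_nil _ t)
        | cons p ps =>
          cases hQ : pvSplitc ')' p with
          | nil => exact absurd hQ (pvSplitc_ne_nil _ p)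
          | cons q qs =>
            have hsplit : pvSplitc ')' (w ++ ')' :: p) = w :: q :: qs := by
              rw [pvSplitc_append ')' w (')' :: p) h2]
              simp [pvSplitc, hQ, List.modifyHead]
            have hIH := ih [] (by simp) (by simp)
            rw [hS] at hIH
            simp only [List.modifyHead, List.nil_append] at hIH
            have hx1' : (')' : Char) ≠ '(' := by decide
            simp only [pvR, hx1', if_false, hIH]
            simp only [pvSplitc, hS, List.modifyHead, hx1', if_false, List.map_cons, pvCat]
            simp only [pvPart, hsplit, hQ, List.dropLast_cons_of_ne_nil (by simp : q :: qs ≠ ([] : List (List Char))),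
              List.map_cons, pvCat, pvLast_cons, String.append_assoc]
            simp
      · cases hS : pvSplitc '(' t with
        | nil => exact absurd hS (pvSplitc_ne_nil _ t)
        | cons p ps =>
          have h1' : '(' ∉ w ++ [x] := by
            simp only [List.mem_append, List.mem_singleton]
            rintro (hm | hm)
            · exact h1 hm
            · exact hx1 hm.symm
          have h2' : ')' ∉ w ++ [x] := by
            simp only [List.mem_append, List.mem_singleton]
            rintro (hm | hm)
            · exact h2 hm
            · exact hx2 hm.symm
          have hIH := ih (w ++ [x]) h1' h2'
          rw [hS] at hIH
          simp only [List.modifyHead] at hIH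
          simp only [pvR, hx1, hx2, if_false, hIH]
          simp [pvSplitc_cons, hS, hx1, List.modifyHead, List.append_assoc]

-- A's second phase as a function of the token list
def pvRender (kd : PySem.Dict String String) (ws : List (String × Nat)) (acc : String) : String :=
  ws.foldl (fun ret wk => if wk.2 ≠ 0 then ret ++ kd.getD wk.1 "?" else ret ++ wk.1) acc

lemma pvRender_append (kd : PySem.Dict String String) (ws : List (String × Nat))
    (p : String × Nat) (acc : String) :
    pvRender kd (ws ++ [p]) acc
      = (if p.2 ≠ 0 then pvRender kd ws acc ++ kd.getD p.1 "?" else pvRender kd ws acc ++ p.1) := by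
  simp [pvRender, List.foldl_append]

-- A's two phases render to pvR
lemma pvA_spec (kd : PySem.Dict String String) :
    ∀ (cs : List Char) (ws : List (String × Nat)) (w : String),
    pvRender kd (cs.foldl (fun (p : List (String × Nat) × String) c =>
        if c = '(' then (p.1 ++ [(p.2, 0)], "")
        else if c = ')' then (p.1 ++ [(p.2, 1)], "")
        else (p.1, p.2.push c)) (ws, w)).1 ""
      ++ (cs.foldl (fun (p : List (String × Nat) × String) c =>
        if c = '(' then (p.1 ++ [(p.2, 0)], "")
        else if c = ')' then (p.1 ++ [(p.2, 1)], "")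
        else (p.1, p.2.push c)) (ws, w)).2
    = pvRender kd ws "" ++ pvR kd cs w.toList := by
  intro cs
  induction cs with
  | nil =>
    intro ws w
    simp [pvR]
  | cons c t ih =>
    intro ws w
    by_cases h1 : c = '('
    · subst h1
      have H := ih (ws ++ [(w, 0)]) ""
      rw [pvRender_append] at H
      simp only [ne_eq, not_true_eq_false, if_false, String.toList_empty] at H
      simp only [List.foldl_cons, if_true]
      rw [H]
      simp [pvR, String.append_assoc]
    · by_cases h2 : c = ')'
      · subst h2
        have H := ih (ws ++ [(w, 1)]) ""
        rw [pvRender_append] at H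
        simp only [ne_eq, String.toList_empty] at H
        simp only [List.foldl_cons, if_neg h1, if_true]
        rw [if_pos (by decide)] at H
        rw [H]
        simp [pvR, String.append_assoc]
      · have H := ih ws (w.push c)
        simp only [List.foldl_cons, if_neg h1, if_neg h2]
        rw [H]
        simp [pvR, h1, h2, String.toList_push]

-- ''.join with empty separator is concatenation
lemma pvJoin_empty (l : List String) : PySem.Str.join "" l = pvCat l := by
  induction l with
  | nil => simp [PySem.Str.join, PySem.Chars.join, pvCat, List.intercalate]
  | cons x t ih =>
    cases t with
    | nil => simp [PySem.Str.join, PySem.Chars.join, pvCat, List.intercalate]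
    | cons y r =>
      have h : PySem.Chars.join [] (List.map String.toList (x :: y :: r))
          = x.toList ++ PySem.Chars.join [] (List.map String.toList (y :: r)) := by
        simp [PySem.Chars.join, List.intercalate]
      simp only [PySem.Str.join, String.toList_empty] at ih ⊢
      simp only [List.map_cons] at h ih ⊢
      rw [h, String.ofList_append, String.ofList_toList, pvCat, ih]

lemma pvCat_flatMap (f : List Char → List String) (parts : List (List Char)) :
    pvCat (parts.flatMap f) = pvCat (parts.map (fun p => pvCat (f p))) := by
  induction parts with
  | nil => simp [pvCat]
  | cons p ps ih => simp [List.flatMap_cons, pvCat_append, pvCat, ih]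

lemma pvFoldl_out (g : List Char → List String) (h : List Char → String) (parts : List (List Char)) :
    ∀ init : List String,
    parts.foldl (fun out part => (out ++ g part) ++ [h part]) init
      = init ++ parts.flatMap (fun part => g part ++ [h part]) := by
  induction parts with
  | nil => intro init; simp
  | cons p ps ih => intro init; simp [List.append_assoc, List.flatMap_def]

-- ===== VERDICT (by name: the statement is the Claim_ definition above) =====
theorem evaluate_spec : Claim_equal_evaluate := by
  intro s knowledge _ _
  show evaluate s knowledge = evaluate_alt s knowledge
  simp only [evaluate, evaluate_alt]
  rw [pvFoldl_out, pvSplitOn_eq]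
  rw [List.foldl_append]
  have hA := pvA_spec (pvKnowDict knowledge) s.toList [] ""
  simp only [pvRender, List.foldl_nil, List.foldl_cons, String.toList_empty, ne_eq,
    not_true_eq_false, if_false, String.empty_append] at hA ⊢
  rw [hA]
  rw [pvJoin_empty, List.nil_append, pvCat_flatMap]
  have hB := pvB_spec (pvKnowDict knowledge) s.toList [] (by simp) (by simp)
  cases hS : pvSplitc '(' s.toList with
  | nil => exact absurd hS (pvSplitc_ne_nil _ _)
  | cons p ps =>
    rw [hS] at hB
    simp only [List.modifyHead, List.nil_append] at hB
    rw [hB]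
    congr 1
    refine List.map_congr_left ?_
    intro part _
    simp [pvPart, pvSplitOn_eq, pvCat_append, pvCat]
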